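-- pv_equiv track=rewrite | github.com/nlp-tlp/aquila | data_warehousing/utils_dw.py | get_parent_lookup_dict
-- ===== SOURCE A (Python) =====
-- from collections import OrderedDict, defaultdict
--
-- def get_parent_lookup_dict(category_hierarchy):
-- 	parent_lookup_dict = defaultdict(list)
-- 	for category in category_hierarchy:
-- 		original_category = category
-- 		top_level = False
-- 		while not top_level:
-- 			parent = category_hierarchy[category]
-- 			if parent is not None:
-- 				category = parent
-- 				parent_lookup_dict[original_category].append(category)
-- 			else:
-- 				top_level = True
-- 				parent = category
-- 	#print parent_lookup_dict
-- 	return parent_lookup_dict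
-- ===== SOURCE B (Python) =====
-- from collections import defaultdict
--
-- def get_parent_lookup_dict(category_hierarchy):
-- 	# Memoized ancestor chains: walk up only as far as the first already-solved
-- 	# category, then fill the results back down, so each link is traversed once.
-- 	# A walk longer than the hierarchy itself can only mean a cycle: fail fast.
-- 	memo = {}
--
-- 	def ancestors(c):
-- 		stack = []
-- 		cur = c
-- 		for _ in range(len(category_hierarchy) + 1):
-- 			if cur in memo:
-- 				break
-- 			parent = category_hierarchy[cur]
-- 			if parent is None:
-- 				memo[cur] = []
-- 				break
-- 			stack.append((cur, parent))
-- 			cur = parent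
-- 		else:
-- 			raise ValueError("cycle in category hierarchy")
-- 		for node, parent in reversed(stack):
-- 			memo[node] = [parent] + memo[parent]
-- 		return memo[c]
--
-- 	parent_lookup_dict = defaultdict(list)
-- 	for category in category_hierarchy:
-- 		anc = ancestors(category)
-- 		if anc:
-- 			parent_lookup_dict[category] = anc
-- 	return parent_lookup_dict
-- ===== Notes on version B (the rewrite author's own statement) =====
-- stated objective: faster
-- what changed: A re-walks the whole parent chain to the root separately for every category; B memoizes ancestor lists, walking up only to the first already-solved category and filling results back down, so each parent link is traversed once.
import Mathlib
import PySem

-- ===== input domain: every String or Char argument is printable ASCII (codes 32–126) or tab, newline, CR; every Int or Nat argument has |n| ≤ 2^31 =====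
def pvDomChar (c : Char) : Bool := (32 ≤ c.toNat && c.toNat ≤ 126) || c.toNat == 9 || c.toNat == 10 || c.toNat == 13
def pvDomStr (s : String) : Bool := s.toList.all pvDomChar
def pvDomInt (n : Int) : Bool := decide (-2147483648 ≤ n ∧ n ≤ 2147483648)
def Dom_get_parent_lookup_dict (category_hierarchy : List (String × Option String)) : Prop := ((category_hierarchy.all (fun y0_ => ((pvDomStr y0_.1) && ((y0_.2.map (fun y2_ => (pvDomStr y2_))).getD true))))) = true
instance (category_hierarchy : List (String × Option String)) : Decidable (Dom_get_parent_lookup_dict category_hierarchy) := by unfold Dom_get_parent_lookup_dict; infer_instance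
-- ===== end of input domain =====

-- B memoizes ancestor chains (walk up to the first solved category, fill back down)
-- instead of A's full re-walk per category; return-value equivalence on acyclic,
-- parent-closed hierarchies (exactly where the Python A returns).


-- ===== PORT A =====
-- the while loop of A, one recursive call per iteration; fuel d.size suffices on Pre_
def pvAWhile (d : PySem.Dict String (Option String)) : Nat → PySem.Dict String (List String) → String → String → PySem.Dict String (List String)
  | 0, pld, _, _ => pld
  | fuel+1, pld, orig, cat =>
    match d.get? cat with
    | some (some p) => pvAWhile d fuel (pld.modify orig [] (· ++ [p])) orig p
    | some none => pld          -- top_level = True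
    | none => pld               -- KeyError: excluded by Pre_

def get_parent_lookup_dict (category_hierarchy : List (String × Option String)) : List (String × List String) :=
  let d := PySem.Dict.ofList category_hierarchy
  (d.keys.foldl (fun pld category => pvAWhile d d.size pld category category) PySem.Dict.empty).items

-- ===== PORT B =====
-- Source B's bounded 'cur not in memo' walk (at most len+1 = d.size+1 steps; running out
-- of fuel is Source B's ValueError on a cycle, excluded by Pre_); returns (stack, memo)
def pvWalk (d : PySem.Dict String (Option String)) : Nat → PySem.Dict String (List String) → String → List (String × String) → (List (String × String) × PySem.Dict String (List String))
  | 0, memo, _, stack => (stack, memo)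
  | fuel+1, memo, cur, stack =>
    match memo.get? cur with
    | some _ => (stack, memo)
    | none =>
      match d.get? cur with
      | some (some p) => pvWalk d fuel memo p (stack ++ [(cur, p)])
      | some none => (stack, memo.insert cur [])
      | none => (stack, memo)   -- KeyError: excluded by Pre_

-- Source B's 'for node, parent in reversed(stack)' fill-down loop
def pvFill (stack : List (String × String)) (memo : PySem.Dict String (List String)) : PySem.Dict String (List String) :=
  stack.foldr (fun np m => m.insert np.1 (np.2 :: m.getD np.2 [])) memo

-- Source B's ancestors(c): walk up, fill back, read memo[c]
def pvAncB (d : PySem.Dict String (Option String)) (fuel : Nat) (memo : PySem.Dict String (List String)) (c : String) : List String × PySem.Dict String (List String) :=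
  let wr := pvWalk d fuel memo c []
  let memo2 := pvFill wr.1 wr.2
  (memo2.getD c [], memo2)

def get_parent_lookup_dict_alt (category_hierarchy : List (String × Option String)) : List (String × List String) :=
  let d := PySem.Dict.ofList category_hierarchy
  (d.keys.foldl (fun s c =>
      let pr := pvAncB d (d.size + 1) s.2 c
      if pr.1.isEmpty then (s.1, pr.2) else (s.1.insert c pr.1, pr.2))
    ((PySem.Dict.empty : PySem.Dict String (List String)), (PySem.Dict.empty : PySem.Dict String (List String)))).1.items

-- ===== PRECONDITION & SPEC =====
-- parent-pointer step: some c ↦ its parent (none at a top-level or missing category)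
def pvStep (d : PySem.Dict String (Option String)) (o : Option String) : Option String :=
  o.bind (fun c => (d.get? c).join)

-- "the chain from c reaches a top level within fuel steps"
def pvTerm (d : PySem.Dict String (Option String)) (fuel : Nat) (c : String) : Bool :=
  (pvStep d)^[fuel] (some c) == none

-- Pre_: every listed parent is itself a category (else A raises KeyError) and every
-- chain reaches a top-level category within |dict| steps (a cycle makes A loop forever);
-- this is exactly the set of inputs on which the Python A returns.
def Pre_get_parent_lookup_dict (category_hierarchy : List (String × Option String)) : Prop :=
  (∀ c ∈ (PySem.Dict.ofList category_hierarchy).keys,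
      ((PySem.Dict.ofList category_hierarchy).get? c).join.all
        (fun q => (PySem.Dict.ofList category_hierarchy).contains q) = true) ∧
  (∀ c ∈ (PySem.Dict.ofList category_hierarchy).keys,
      pvTerm (PySem.Dict.ofList category_hierarchy) (PySem.Dict.ofList category_hierarchy).size c = true)

instance (category_hierarchy : List (String × Option String)) : Decidable (Pre_get_parent_lookup_dict category_hierarchy) := by unfold Pre_get_parent_lookup_dict; infer_instance

def pvWitness_get_parent_lookup_dict : (List (String × Option String)) :=
  [("a", some "b"), ("b", some "c"), ("c", none), ("d", none)]

def Spec_get_parent_lookup_dict (category_hierarchy : List (String × Option String)) (out : List (String × List String)) : Prop := out = get_parent_lookup_dict_alt category_hierarchy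
instance (category_hierarchy : List (String × Option String)) (out : List (String × List String)) : Decidable (Spec_get_parent_lookup_dict category_hierarchy out) := by unfold Spec_get_parent_lookup_dict; infer_instance

-- ===== CLAIM (what is proved, stated in full; the proofs are below) =====
def Claim_equal_get_parent_lookup_dict : Prop := ∀ (category_hierarchy : List (String × Option String)), Dom_get_parent_lookup_dict category_hierarchy → Pre_get_parent_lookup_dict category_hierarchy → Spec_get_parent_lookup_dict category_hierarchy (get_parent_lookup_dict category_hierarchy)

-- ===== LEMMAS AND PROOFS =====

-- the pure ancestor chain of c, by fuel
def pvChainF (d : PySem.Dict String (Option String)) : Nat → String → List String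
  | 0, _ => []
  | fuel+1, c =>
    match (d.get? c).join with
    | some p => p :: pvChainF d fuel p
    | none => []

theorem pvTerm_mono (d : PySem.Dict String (Option String)) {m g : Nat} {c : String}
    (h : pvTerm d m c = true) (hle : m ≤ g) : pvTerm d g c = true := by
  unfold pvTerm at *
  rw [beq_iff_eq] at *
  rw [← Nat.sub_add_cancel hle, Function.iterate_add_apply, h]
  exact Function.iterate_fixed rfl _

theorem pvTerm_step (d : PySem.Dict String (Option String)) {m : Nat} {c p : String}
    (hp : (d.get? c).join = some p) (h : pvTerm d (m+1) c = true) : pvTerm d m p = true := by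
  unfold pvTerm at *
  rwa [Function.iterate_succ_apply, show pvStep d (some c) = some p by simp [pvStep, hp]] at h

theorem pvTerm_step' (d : PySem.Dict String (Option String)) {m : Nat} {c p : String}
    (hp : (d.get? c).join = some p) (h : pvTerm d m p = true) : pvTerm d (m+1) c = true := by
  unfold pvTerm at *
  rwa [Function.iterate_succ_apply, show pvStep d (some c) = some p by simp [pvStep, hp]]

theorem pvChainF_stab (d : PySem.Dict String (Option String)) :
    ∀ (fuel : Nat) (c : String) (g : Nat), pvTerm d fuel c = true → fuel ≤ g →
      pvChainF d g c = pvChainF d fuel c := by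
  intro fuel
  induction fuel with
  | zero =>
    intro c g h _
    simp [pvTerm] at h
  | succ n ih =>
    intro c g h hle
    obtain ⟨g', rfl⟩ : ∃ g', g = g' + 1 := ⟨g - 1, by omega⟩
    cases hp : (d.get? c).join with
    | none => simp [pvChainF, hp]
    | some p =>
      have hTp := pvTerm_step d hp h
      simp only [pvChainF, hp]
      rw [ih p g' hTp (by omega)]

theorem pvChainF_eq_of_term (d : PySem.Dict String (Option String)) {a b : Nat} {c : String}
    (ha : pvTerm d a c = true) (hb : pvTerm d b c = true) :
    pvChainF d a c = pvChainF d b c := by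
  rcases Nat.le_total a b with h | h
  · rw [pvChainF_stab d a c b ha h]
  · rw [pvChainF_stab d b c a hb h]

-- A's inner loop is the fold of modify-append over the chain
theorem pvAWhile_eq_foldl (d : PySem.Dict String (Option String)) :
    ∀ (fuel : Nat) (pld : PySem.Dict String (List String)) (orig cat : String),
      pvAWhile d fuel pld orig cat =
        (pvChainF d fuel cat).foldl (fun pl p => pl.modify orig [] (· ++ [p])) pld := by
  intro fuel
  induction fuel with
  | zero => intro pld orig cat; simp [pvAWhile, pvChainF]
  | succ n ih =>
    intro pld orig cat
    cases h : d.get? cat with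
    | none => simp [pvAWhile, pvChainF, h, Option.join]
    | some po =>
      cases po with
      | none => simp [pvAWhile, pvChainF, h, Option.join]
      | some p => simp [pvAWhile, pvChainF, h, Option.join, ih]

-- folding modify-append over a nonempty list is one insert of the concatenation
theorem foldl_modify_append (orig : String) :
    ∀ (l : List String), l ≠ [] → ∀ (pld : PySem.Dict String (List String)),
      l.foldl (fun pl p => pl.modify orig [] (· ++ [p])) pld =
        pld.insert orig (pld.getD orig [] ++ l) := by
  intro l
  induction l with
  | nil => intro h; exact absurd rfl h
  | cons x tl ih =>
    intro _ pld
    cases tl with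
    | nil => simp [List.foldl, PySem.Dict.modify]
    | cons y tl' =>
      rw [List.foldl_cons, ih (by simp) _]
      show ((pld.modify orig [] (· ++ [x])).insert orig _) = _
      rw [PySem.Dict.modify, PySem.Dict.insert_insert_self, PySem.Dict.getD_insert_self]
      simp

-- memo invariant: every stored value is a correct ancestor chain
def pvInv (d : PySem.Dict String (Option String)) (memo : PySem.Dict String (List String)) : Prop :=
  ∀ k v, memo.get? k = some v → ∃ m, pvTerm d m k = true ∧ v = pvChainF d m k

theorem pvInv_insert (d : PySem.Dict String (Option String)) {memo : PySem.Dict String (List String)}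
    (hI : pvInv d memo) {c : String} {m : Nat} (hT : pvTerm d m c = true) :
    pvInv d (memo.insert c (pvChainF d m c)) := by
  intro k v hkv
  rw [PySem.Dict.get?_insert] at hkv
  split at hkv
  · rename_i hkc; subst hkc
    exact ⟨m, hT, (Option.some_inj.mp hkv).symm⟩
  · exact hI k v hkv

-- the walk result does not depend on the incoming stack except by prefixing it
theorem pvWalk_stack (d : PySem.Dict String (Option String)) :
    ∀ (fuel : Nat) (memo : PySem.Dict String (List String)) (c : String) (stack : List (String × String)),
      pvWalk d fuel memo c stack =
        (stack ++ (pvWalk d fuel memo c []).1, (pvWalk d fuel memo c []).2) := by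
  intro fuel
  induction fuel with
  | zero => intro memo c stack; simp [pvWalk]
  | succ n ih =>
    intro memo c stack
    cases hm : memo.get? c with
    | some r => simp [pvWalk, hm]
    | none =>
      cases hd : d.get? c with
      | none => simp [pvWalk, hm, hd]
      | some po =>
        cases po with
        | none => simp [pvWalk, hm, hd]
        | some p =>
          simp only [pvWalk, hm, hd, List.nil_append]
          rw [ih memo p (stack ++ [(c, p)]), ih memo p [(c, p)]]
          simp

-- correctness of Source B's ancestors: returns the chain and preserves the invariant
theorem pvAncB_correct (d : PySem.Dict String (Option String)) :
    ∀ (fuel : Nat) (c : String) (memo : PySem.Dict String (List String)),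
      pvTerm d fuel c = true → pvInv d memo →
      ∃ m, pvTerm d m c = true ∧
        (pvAncB d fuel memo c).1 = pvChainF d m c ∧ pvInv d (pvAncB d fuel memo c).2 := by
  intro fuel
  induction fuel with
  | zero => intro c memo h _; simp [pvTerm] at h
  | succ n ih =>
    intro c memo hT hI
    cases hm : memo.get? c with
    | some r =>
      obtain ⟨m, hTm, hv⟩ := hI c r hm
      refine ⟨m, hTm, ?_, ?_⟩
      · simp [pvAncB, pvWalk, pvFill, PySem.Dict.getD_eq_get?_getD, hm, hv]
      · simpa [pvAncB, pvWalk, hm, pvFill] using hI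
    | none =>
      cases hd : d.get? c with
      | none =>
        refine ⟨n + 1, hT, ?_, ?_⟩
        · simp [pvAncB, pvWalk, hd, pvFill, pvChainF, Option.join,
                PySem.Dict.getD_eq_get?_getD, hm]
        · simpa [pvAncB, pvWalk, hm, hd, pvFill] using hI
      | some po =>
        cases po with
        | none =>
          refine ⟨n + 1, hT, ?_, ?_⟩
          · simp [pvAncB, pvWalk, hm, hd, pvFill, pvChainF, Option.join,
                  PySem.Dict.getD_insert_self]
          · have : pvChainF d (n+1) c = [] := by simp [pvChainF, hd, Option.join]
            simpa [pvAncB, pvWalk, hm, hd, pvFill, ← this] using pvInv_insert d hI hT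
        | some p =>
          have hj : (d.get? c).join = some p := by simp [hd, Option.join]
          have hTp : pvTerm d n p = true := pvTerm_step d hj hT
          obtain ⟨m, hTm, hval, hInv⟩ := ih p memo hTp hI
          have hwalk : pvWalk d (n+1) memo c [] =
              ((c, p) :: (pvWalk d n memo p []).1, (pvWalk d n memo p []).2) := by
            simp only [pvWalk, hm, hd, List.nil_append]
            rw [pvWalk_stack d n memo p [(c, p)]]
            simp
          have hfill : pvFill ((c, p) :: (pvWalk d n memo p []).1) (pvWalk d n memo p []).2 =
              (pvAncB d n memo p).2.insert c (p :: (pvAncB d n memo p).1) := by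
            simp [pvFill, pvAncB, List.foldr_cons, PySem.Dict.getD_eq_get?_getD]
          have hchain : pvChainF d (m+1) c = p :: pvChainF d m p := by
            simp [pvChainF, hj]
          refine ⟨m + 1, pvTerm_step' d hj hTm, ?_, ?_⟩
          · simp only [pvAncB, hwalk, hfill]
            rw [hchain, ← hval, PySem.Dict.getD_insert_self]
            simp [pvAncB]
          · simp only [pvAncB, hwalk, hfill]
            have := pvInv_insert d hInv (m := m + 1) (pvTerm_step' d hj hTm)
            rw [hchain, ← hval] at this
            simpa [pvAncB] using this

-- the two outer folds over the category keys agree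
theorem pv_main_fold (d : PySem.Dict String (Option String)) :
    ∀ (ks : List String) (pld : PySem.Dict String (List String)) (memo : PySem.Dict String (List String)),
      ks.Nodup → (∀ c ∈ ks, pvTerm d d.size c = true) →
      (∀ c ∈ ks, pld.contains c = false) → pvInv d memo →
      ks.foldl (fun pl category => pvAWhile d d.size pl category category) pld =
        (ks.foldl (fun s c =>
            let pr := pvAncB d (d.size + 1) s.2 c
            if pr.1.isEmpty then (s.1, pr.2) else (s.1.insert c pr.1, pr.2)) (pld, memo)).1 := by
  intro ks
  induction ks with
  | nil => intro pld memo _ _ _ _; rfl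
  | cons k tl ih =>
    intro pld memo hnd hT hc hI
    have hTk := hT k (by simp)
    obtain ⟨m, hTm, hval, hInv⟩ := pvAncB_correct d (d.size + 1) k memo
      (pvTerm_mono d hTk (Nat.le_succ _)) hI
    have hchain : (pvAncB d (d.size + 1) memo k).1 = pvChainF d d.size k := by
      rw [hval]; exact pvChainF_eq_of_term d hTm hTk
    have hA : pvAWhile d d.size pld k k =
        (pvChainF d d.size k).foldl (fun pl p => pl.modify k [] (· ++ [p])) pld :=
      pvAWhile_eq_foldl d d.size pld k k
    rw [List.foldl_cons, List.foldl_cons, hA]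
    cases hch : pvChainF d d.size k with
    | nil =>
      have hempty : (pvAncB d (d.size + 1) memo k).1.isEmpty = true := by
        rw [hchain, hch]; rfl
      simp only [List.foldl_nil, hempty, if_pos]
      exact ih pld (pvAncB d (d.size + 1) memo k).2 (List.nodup_cons.mp hnd).2
        (fun c hcm => hT c (by simp [hcm])) (fun c hcm => hc c (by simp [hcm])) hInv
    | cons x xs =>
      have hne : pvChainF d d.size k ≠ [] := by rw [hch]; simp
      have hempty : (pvAncB d (d.size + 1) memo k).1.isEmpty = false := by
        rw [hchain, hch]; rfl
      rw [← hch, foldl_modify_append k _ hne pld,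
          PySem.Dict.getD_of_not_contains pld [] (hc k (by simp)), List.nil_append]
      simp only [hempty, Bool.false_eq_true, if_false]
      rw [← hchain]
      refine ih _ _ (List.nodup_cons.mp hnd).2
        (fun c hcm => hT c (by simp [hcm])) ?_ hInv
      intro c hcm
      rw [PySem.Dict.contains_insert]
      have hck : c ≠ k := fun h => (List.nodup_cons.mp hnd).1 (h ▸ hcm)
      simp [hck, hc c (by simp [hcm])]

-- ===== VERDICT (by name: the statement is the Claim_ definition above) =====
theorem get_parent_lookup_dict_spec : Claim_equal_get_parent_lookup_dict := by
  intro ch _ hPre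
  unfold Spec_get_parent_lookup_dict get_parent_lookup_dict get_parent_lookup_dict_alt
  dsimp only
  obtain ⟨_, hT⟩ := hPre
  rw [pv_main_fold (PySem.Dict.ofList ch) (PySem.Dict.ofList ch).keys PySem.Dict.empty PySem.Dict.empty
    (PySem.Dict.nodup_keys_ofList ch) hT
    (fun c _ => PySem.Dict.contains_empty c)
    (fun k v h => by rw [PySem.Dict.get?_empty] at h; exact absurd h (by simp))]
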